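-- pv_equiv track=rewrite | github.com/MarceloGallardoMadrid/ia-utn-frc | red Neuronal/perceptron.py | normalizar_mtx_bin
-- ===== SOURCE A (Python) =====
-- def normalizar_mtx(min_val,max_val,mtx):
--     minimo=min(mtx[0])
--     maximo=max(mtx[0])
--     for vec in mtx:
--         min_vec=min(vec)
--         max_vec=max(vec)
--         if(min_vec<minimo):
--             minimo=min_vec
--         if(max_vec>maximo):
--             maximo=max_vec
--     new_mtx=[]
--     intervalo=(maximo-minimo)
--     for i in range(len(mtx)):
--         row=[]
--         for j in range(len(mtx[0])):
--             cell=min_val+(max_val-min_val)*((mtx[i][j]-minimo)/intervalo)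
--             row.append(cell)
--         new_mtx.append(row)
--     return new_mtx
--
-- def normalizar_mtx_bin(mtx):
--     mtx=normalizar_mtx(0,1,mtx)
--     new_mtx=[]
--     for i in range(len(mtx)):
--         row=[]
--         for j in range(len(mtx[0])):
--             cell=0
--             if(mtx[i][j]>0.5):
--                 cell=1
--
--             row.append(cell)
--         new_mtx.append(row)
--     return new_mtx
-- ===== SOURCE B (Python) =====
-- def normalizar_mtx_bin(mtx):
--     celdas = sorted(x for fila in mtx for x in fila)
--     minimo, maximo = celdas[0], celdas[-1]
--     intervalo = maximo - minimo
--     ancho = len(mtx[0])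
--     return [[1 if (fila[j] - minimo) / intervalo > 0.5 else 0 for j in range(ancho)]
--             for fila in mtx]
-- ===== Notes on version B (the rewrite author's own statement) =====
-- stated objective: alternative
-- what changed: B finds the global extrema by flattening and sorting the cells once (sort-then-pick first/last) instead of A's per-row running min/max scans, and writes the binary matrix directly in one fused pass over the rows, eliminating A's intermediate normalized float matrix and its index-driven second pass; the per-cell test (x-minimo)/intervalo > 0.5 is kept bit-for-bit.
import Mathlib
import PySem

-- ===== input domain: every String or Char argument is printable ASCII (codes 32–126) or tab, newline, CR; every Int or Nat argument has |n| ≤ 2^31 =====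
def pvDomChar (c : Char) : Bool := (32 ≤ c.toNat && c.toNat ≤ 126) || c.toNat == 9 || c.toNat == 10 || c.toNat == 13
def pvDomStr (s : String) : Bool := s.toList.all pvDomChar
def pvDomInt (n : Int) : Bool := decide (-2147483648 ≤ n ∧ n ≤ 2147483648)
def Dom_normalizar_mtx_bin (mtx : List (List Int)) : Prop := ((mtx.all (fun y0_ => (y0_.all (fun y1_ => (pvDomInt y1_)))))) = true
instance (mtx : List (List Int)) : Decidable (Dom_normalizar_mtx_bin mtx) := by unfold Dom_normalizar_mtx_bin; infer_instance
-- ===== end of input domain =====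

-- B finds the extrema by sorting the flattened cells once (first/last of the sorted list) instead of A's
-- running per-row min/max scans, and binarizes in one fused pass without A's intermediate normalized matrix.
-- Float note (both ports): each normalized cell is the exact rational (x - minimo) / intervalo; the Python float test
-- 'cell > 0.5' is ported as '2*(x - minimo) > intervalo', which is EXACT on Dom: |cells| ≤ 2^31 so numerator and
-- denominator are ≤ 2^33, and IEEE rounding of the single division cannot move the quotient across the float 0.5.

-- ===== PORT A =====
-- first element extremum of a row, as Python min/max (Pre_ keeps every row nonempty, so getD 0 is never taken)
def pvRowMin (v : List Int) : Int := (PySem.List.min? v (fun y => y)).getD 0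
def pvRowMax (v : List Int) : Int := (PySem.List.max? v (fun y => y)).getD 0

-- A's normalizar_mtx: cells are kept as exact rationals (numerator, intervalo) instead of floats (see float note)
def normalizarMtx (min_val max_val : Int) (mtx : List (List Int)) : List (List (Int × Int)) :=
  let minimo0 := pvRowMin mtx.headI     -- min(mtx[0]); Pre_ excludes mtx = [] / mtx[0] = []
  let maximo0 := pvRowMax mtx.headI
  let mm := mtx.foldl (fun (mm : Int × Int) vec =>
      let min_vec := pvRowMin vec
      let max_vec := pvRowMax vec
      ((if min_vec < mm.1 then min_vec else mm.1),
       (if max_vec > mm.2 then max_vec else mm.2))) (minimo0, maximo0)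
  let minimo := mm.1
  let maximo := mm.2
  let intervalo := maximo - minimo
  (PySem.List.pyRange 0 (mtx.length : Int) 1).map (fun i =>
    (PySem.List.pyRange 0 (mtx.headI.length : Int) 1).map (fun j =>
      -- cell = min_val + (max_val-min_val)*((mtx[i][j]-minimo)/intervalo), as a rational over intervalo
      (min_val * intervalo + (max_val - min_val) * (PySem.List.pyGetD (PySem.List.pyGetD mtx i []) j 0 - minimo),
       intervalo)))

def normalizar_mtx_bin (mtx : List (List Int)) : List (List Int) :=
  let m2 := normalizarMtx 0 1 mtx
  (PySem.List.pyRange 0 (m2.length : Int) 1).map (fun i =>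
    (PySem.List.pyRange 0 ((PySem.List.pyGetD m2 0 []).length : Int) 1).map (fun j =>
      let c := PySem.List.pyGetD (PySem.List.pyGetD m2 i []) j ((0 : Int), (0 : Int))
      -- cell = 0; if mtx[i][j] > 0.5: cell = 1   (c.1/c.2 > 1/2 ↔ 2*c.1 > c.2, see float note)
      if 2 * c.1 > c.2 then (1 : Int) else 0))

-- ===== PORT B =====
def normalizar_mtx_bin_alt (mtx : List (List Int)) : List (List Int) :=
  let celdas := PySem.List.sorted mtx.flatten (fun x => x) false   -- sorted(x for fila in mtx for x in fila)
  let minimo := PySem.List.pyGetD celdas 0 0                        -- celdas[0]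
  let maximo := PySem.List.pyGetD celdas (-1) 0                     -- celdas[-1]
  let intervalo := maximo - minimo
  let ancho := mtx.headI.length
  mtx.map (fun fila =>
    (PySem.List.pyRange 0 (ancho : Int) 1).map (fun j =>
      -- 1 if (fila[j]-minimo)/intervalo > 0.5 else 0   (ported exactly, see float note)
      if 2 * (PySem.List.pyGetD fila j 0 - minimo) > intervalo then (1 : Int) else 0))

-- ===== PRECONDITION & SPEC =====
-- exactly where Python A returns: mtx and its first row nonempty, no row shorter than the first
-- (else IndexError), and not all cells equal (else intervalo = 0, ZeroDivisionError)
def Pre_normalizar_mtx_bin (mtx : List (List Int)) : Prop :=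
  mtx ≠ [] ∧ mtx.headI ≠ [] ∧ (∀ row ∈ mtx, mtx.headI.length ≤ row.length) ∧
    ¬(∀ x ∈ mtx.flatten, x = mtx.headI.headI)
instance (mtx : List (List Int)) : Decidable (Pre_normalizar_mtx_bin mtx) := by
  unfold Pre_normalizar_mtx_bin; infer_instance
def pvWitness_normalizar_mtx_bin : List (List Int) := [[0], [1]]

def Spec_normalizar_mtx_bin (mtx : List (List Int)) (out : List (List Int)) : Prop := out = normalizar_mtx_bin_alt mtx
instance (mtx : List (List Int)) (out : List (List Int)) : Decidable (Spec_normalizar_mtx_bin mtx out) := by unfold Spec_normalizar_mtx_bin; infer_instance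

-- ===== CLAIM (what is proved, stated in full; the proofs are below) =====
def Claim_equal_normalizar_mtx_bin : Prop := ∀ (mtx : List (List Int)), Dom_normalizar_mtx_bin mtx → Pre_normalizar_mtx_bin mtx → Spec_normalizar_mtx_bin mtx (normalizar_mtx_bin mtx)

-- ===== LEMMAS AND PROOFS =====

-- A's running min/max pair-fold, split into two plain min/max folds
lemma foldl_pair_minmax (l : List (List Int)) (a b : Int) :
    l.foldl (fun (mm : Int × Int) vec =>
      ((if pvRowMin vec < mm.1 then pvRowMin vec else mm.1),
       (if pvRowMax vec > mm.2 then pvRowMax vec else mm.2))) (a, b)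
      = (l.foldl (fun m vec => min m (pvRowMin vec)) a,
         l.foldl (fun m vec => max m (pvRowMax vec)) b) := by
  induction l generalizing a b with
  | nil => rfl
  | cons h t ih =>
      simp only [List.foldl_cons]
      rw [ih]
      congr 1
      · rcases lt_or_ge (pvRowMin h) a with hlt | hge
        · simp [hlt, min_eq_right hlt.le]
        · simp [not_lt.2 hge, min_eq_left hge]
      · rcases lt_or_ge b (pvRowMax h) with hlt | hge
        · simp [hlt, max_eq_right hlt.le]
        · simp [not_lt.2 hge, max_eq_left hge]

-- A's pair fold equals (min? of row mins, max? of row maxes)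
lemma min_agree (h : List Int) (t : List (List Int)) :
    ((h :: t).foldl (fun (mm : Int × Int) vec =>
      ((if pvRowMin vec < mm.1 then pvRowMin vec else mm.1),
       (if pvRowMax vec > mm.2 then pvRowMax vec else mm.2))) (pvRowMin h, pvRowMax h))
    = ((PySem.List.min? ((h :: t).map pvRowMin) (fun y => y)).getD 0,
       (PySem.List.max? ((h :: t).map pvRowMax) (fun y => y)).getD 0) := by
  rw [foldl_pair_minmax]
  simp only [List.map_cons, PySem.List.min?_id_cons, PySem.List.max?_id_cons, Option.getD_some,
    List.foldl_cons, List.foldl_map, min_self, max_self]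

-- the min of the row mins is in the flattened matrix and below every cell
lemma rowmins_min_spec (mtx : List (List Int)) (hne : mtx ≠ []) (hrows : ∀ r ∈ mtx, r ≠ []) :
    (PySem.List.min? (mtx.map pvRowMin) (fun y => y)).getD 0 ∈ mtx.flatten ∧
    ∀ y ∈ mtx.flatten, (PySem.List.min? (mtx.map pvRowMin) (fun y => y)).getD 0 ≤ y := by
  obtain ⟨v, hv⟩ : ∃ v, PySem.List.min? (mtx.map pvRowMin) (fun y => y) = some v := by
    rcases Option.eq_none_or_eq_some (PySem.List.min? (mtx.map pvRowMin) (fun y => y)) with h0 | h0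
    · rw [PySem.List.min?_eq_none_iff, List.map_eq_nil_iff] at h0; exact absurd h0 hne
    · exact h0
  rw [hv, Option.getD_some]
  constructor
  · have hmem := PySem.List.min?_mem hv
    obtain ⟨r, hr, hrv⟩ := List.mem_map.1 hmem
    subst hrv
    obtain ⟨w, hw⟩ : ∃ w, PySem.List.min? r (fun y => y) = some w := by
      rcases Option.eq_none_or_eq_some (PySem.List.min? r (fun y => y)) with h0 | h0
      · rw [PySem.List.min?_eq_none_iff] at h0; exact absurd h0 (hrows r hr)
      · exact h0
    unfold pvRowMin
    rw [hw, Option.getD_some]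
    exact List.mem_flatten.2 ⟨r, hr, PySem.List.min?_mem hw⟩
  · intro y hy
    obtain ⟨r, hr, hyr⟩ := List.mem_flatten.1 hy
    have h1 : v ≤ pvRowMin r :=
      PySem.List.min?_isMin hv (pvRowMin r) (List.mem_map.2 ⟨r, hr, rfl⟩)
    obtain ⟨w, hw⟩ : ∃ w, PySem.List.min? r (fun y => y) = some w := by
      rcases Option.eq_none_or_eq_some (PySem.List.min? r (fun y => y)) with h0 | h0
      · rw [PySem.List.min?_eq_none_iff] at h0; exact absurd h0 (hrows r hr)
      · exact h0
    have h2 : w ≤ y := PySem.List.min?_isMin hw y hyr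
    have : pvRowMin r = w := by unfold pvRowMin; rw [hw, Option.getD_some]
    omega
-- mirror for max
lemma rowmaxs_max_spec (mtx : List (List Int)) (hne : mtx ≠ []) (hrows : ∀ r ∈ mtx, r ≠ []) :
    (PySem.List.max? (mtx.map pvRowMax) (fun y => y)).getD 0 ∈ mtx.flatten ∧
    ∀ y ∈ mtx.flatten, y ≤ (PySem.List.max? (mtx.map pvRowMax) (fun y => y)).getD 0 := by
  obtain ⟨v, hv⟩ : ∃ v, PySem.List.max? (mtx.map pvRowMax) (fun y => y) = some v := by
    rcases Option.eq_none_or_eq_some (PySem.List.max? (mtx.map pvRowMax) (fun y => y)) with h0 | h0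
    · rw [PySem.List.max?_eq_none_iff, List.map_eq_nil_iff] at h0; exact absurd h0 hne
    · exact h0
  rw [hv, Option.getD_some]
  constructor
  · have hmem := PySem.List.max?_mem hv
    obtain ⟨r, hr, hrv⟩ := List.mem_map.1 hmem
    subst hrv
    obtain ⟨w, hw⟩ : ∃ w, PySem.List.max? r (fun y => y) = some w := by
      rcases Option.eq_none_or_eq_some (PySem.List.max? r (fun y => y)) with h0 | h0
      · rw [PySem.List.max?_eq_none_iff] at h0; exact absurd h0 (hrows r hr)
      · exact h0
    unfold pvRowMax
    rw [hw, Option.getD_some]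
    exact List.mem_flatten.2 ⟨r, hr, PySem.List.max?_mem hw⟩
  · intro y hy
    obtain ⟨r, hr, hyr⟩ := List.mem_flatten.1 hy
    have h1 : pvRowMax r ≤ v :=
      PySem.List.max?_isMax hv (pvRowMax r) (List.mem_map.2 ⟨r, hr, rfl⟩)
    obtain ⟨w, hw⟩ : ∃ w, PySem.List.max? r (fun y => y) = some w := by
      rcases Option.eq_none_or_eq_some (PySem.List.max? r (fun y => y)) with h0 | h0
      · rw [PySem.List.max?_eq_none_iff] at h0; exact absurd h0 (hrows r hr)
      · exact h0
    have h2 : y ≤ w := PySem.List.max?_isMax hw y hyr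
    have : pvRowMax r = w := by unfold pvRowMax; rw [hw, Option.getD_some]
    omega

-- the head of the sorted flattened cells is the min of the row mins,
-- its last element the max of the row maxes (uniqueness of extrema by antisymmetry)
lemma extrema_agree (mtx : List (List Int)) (hne : mtx ≠ []) (hrows : ∀ r ∈ mtx, r ≠ []) :
    ((PySem.List.min? (mtx.map pvRowMin) (fun y => y)).getD 0,
     (PySem.List.max? (mtx.map pvRowMax) (fun y => y)).getD 0)
    = (PySem.List.pyGetD (PySem.List.sorted mtx.flatten (fun x => x) false) 0 0,
       PySem.List.pyGetD (PySem.List.sorted mtx.flatten (fun x => x) false) (-1) 0) := by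
  have hfl : mtx.flatten ≠ [] := by
    obtain ⟨h, t, rfl⟩ := List.exists_cons_of_ne_nil hne
    have := hrows h (List.mem_cons_self)
    simp [List.flatten_cons, this]
  have hs : PySem.List.sorted mtx.flatten (fun x => x) false ≠ [] := by
    rw [Ne, PySem.List.sorted_eq_nil_iff]; exact hfl
  obtain ⟨hmin_mem, hmin_le⟩ := rowmins_min_spec mtx hne hrows
  obtain ⟨hmax_mem, hmax_ge⟩ := rowmaxs_max_spec mtx hne hrows
  obtain ⟨m, s', hcons⟩ := List.exists_cons_of_ne_nil hs
  rw [Prod.mk.injEq]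
  constructor
  · -- min side: head of sorted
    rw [hcons, PySem.List.pyGetD_zero_cons]
    have hm_mem : m ∈ mtx.flatten := by
      rw [← PySem.List.mem_sorted (key := fun x => x) (rev := false), hcons]
      exact List.mem_cons_self
    have hm_le := PySem.List.key_head_sorted_le _ _ hcons
    exact le_antisymm (hmin_le m hm_mem) (hm_le _ hmin_mem)
  · -- max side: last of sorted
    rw [PySem.List.pyGetD_neg_one _ _ hs]
    set s := PySem.List.sorted mtx.flatten (fun x => x) false with hsdef
    have hlast_mem : s.getLast hs ∈ mtx.flatten := by
      rw [← PySem.List.mem_sorted (key := fun x => x) (rev := false), ← hsdef]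
      exact List.getLast_mem hs
    have hlast_ge : ∀ y ∈ mtx.flatten, y ≤ s.getLast hs := by
      intro y hy
      have hys : y ∈ s := by
        rw [hsdef, PySem.List.mem_sorted]; exact hy
      obtain ⟨p, hp, hyp⟩ := List.mem_iff_getElem.1 hys
      have hlen : 0 < s.length := List.length_pos_of_ne_nil hs
      rw [List.getLast_eq_getElem]
      have hq : s.length - 1 < (PySem.List.sorted mtx.flatten (fun x => x) false).length := by
        rw [← hsdef]; omega
      have hmono := PySem.List.sorted_id_getElem_mono mtx.flatten
        (p := p) (q := s.length - 1) (by omega) hq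
      exact le_of_eq_of_le hyp.symm hmono
    exact le_antisymm (hlast_ge _ hmax_mem) (hmax_ge _ hlast_mem)

theorem normalizar_mtx_bin_spec : Claim_equal_normalizar_mtx_bin := by
  intro mtx _ hpre
  obtain ⟨hne, hh, hlen', _⟩ := hpre
  have hrows : ∀ r ∈ mtx, r ≠ [] := by
    intro r hr
    intro h0
    have := hlen' r hr
    rw [h0] at this
    simp only [List.length_nil, Nat.le_zero, List.length_eq_zero_iff] at this
    exact hh this
  obtain ⟨h, t, rfl⟩ := List.exists_cons_of_ne_nil hne
  unfold Spec_normalizar_mtx_bin normalizar_mtx_bin normalizar_mtx_bin_alt normalizarMtx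
  simp only [List.headI_cons]
  simp only [min_agree h t]
  have hext := extrema_agree (h :: t) hne hrows
  have h1 := congrArg Prod.fst hext
  have h2 := congrArg Prod.snd hext
  simp only at h1 h2
  rw [← h1, ← h2]
  generalize (PySem.List.min? ((h :: t).map pvRowMin) (fun y => y)).getD 0 = minimo
  generalize (PySem.List.max? ((h :: t).map pvRowMax) (fun y => y)).getD 0 = maximo
  set f : Int → List (Int × Int) := fun i =>
    (PySem.List.pyRange 0 (h.length : Int) 1).map (fun j =>
      (0 * (maximo - minimo) + (1 - 0) * (PySem.List.pyGetD (PySem.List.pyGetD (h :: t) i []) j 0 - minimo),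
       maximo - minimo)) with hf
  have hn0 : (0 : Int) < ((h :: t).length : Int) := by simp
  have hM2len : (((PySem.List.pyRange 0 ((h :: t).length : Int) 1).map f).length : Int)
      = ((h :: t).length : Int) := by simp [PySem.List.length_pyRange_one]
  have hrow0 : PySem.List.pyGetD ((PySem.List.pyRange 0 ((h :: t).length : Int) 1).map f) 0 [] = f 0 :=
    PySem.List.pyGetD_map_pyRange_of_nonneg f _ 0 [] le_rfl hn0
  have hrow0len : ((PySem.List.pyGetD ((PySem.List.pyRange 0 ((h :: t).length : Int) 1).map f) 0 []).length : Int)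
      = (h.length : Int) := by rw [hrow0, hf]; simp [PySem.List.length_pyRange_one]
  simp only [hM2len, hrow0len]
  have hB : (h :: t) = (PySem.List.pyRange 0 ((h :: t).length : Int) 1).map
      (fun i => PySem.List.pyGetD (h :: t) i []) :=
    (PySem.List.map_pyGetD_pyRange_zero (h :: t) []).symm
  conv_rhs => rw [hB]
  rw [List.map_map]
  apply List.map_congr_left
  intro i hi
  rw [PySem.List.mem_pyRange_one] at hi
  have hrowi : PySem.List.pyGetD ((PySem.List.pyRange 0 ((h :: t).length : Int) 1).map f) i [] = f i :=
    PySem.List.pyGetD_map_pyRange_of_nonneg f _ i [] hi.1 hi.2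
  simp only [Function.comp_apply, hrowi]
  rw [hf]
  simp only []
  apply List.map_congr_left
  intro j hj
  rw [PySem.List.mem_pyRange_one] at hj
  have hcell := PySem.List.pyGetD_map_pyRange_of_nonneg
    (fun j => (0 * (maximo - minimo) + (1 - 0) * (PySem.List.pyGetD (PySem.List.pyGetD (h :: t) i []) j 0 - minimo),
      maximo - minimo)) (h.length : Int) j ((0 : Int), (0 : Int)) hj.1 hj.2
  simp only [hcell]
  norm_num

-- ===== end =====
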